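-- pv_equiv track=rewrite | github.com/antoniocsj/robo-trader | src/DirectoryCorrectionMultiProc.py | find_max_power2_less_half
-- ===== SOURCE A (Python) =====
-- def find_max_power2_less_half(n: int) -> int:
--     i = 0
--     power2 = 2 ** i
--     half = n // 2
--     while power2 < half:
--         i += 1
--         power2 = 2 ** i
--         if power2 > half:
--             i -= 1
--             break
--     return 2 ** i
-- ===== SOURCE B (Python) =====
-- def find_max_power2_less_half(n: int) -> int:
--     half = n // 2
--     if half < 1:
--         return 1
--     return 1 << (half.bit_length() - 1)
-- ===== Notes on version B (the rewrite author's own statement) =====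
-- stated objective: idiomatic
-- what changed: Replaced the iterative doubling loop with the closed-form bit trick on half.bit_length(), with a guard for the case where A's loop never runs.
import Mathlib
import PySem

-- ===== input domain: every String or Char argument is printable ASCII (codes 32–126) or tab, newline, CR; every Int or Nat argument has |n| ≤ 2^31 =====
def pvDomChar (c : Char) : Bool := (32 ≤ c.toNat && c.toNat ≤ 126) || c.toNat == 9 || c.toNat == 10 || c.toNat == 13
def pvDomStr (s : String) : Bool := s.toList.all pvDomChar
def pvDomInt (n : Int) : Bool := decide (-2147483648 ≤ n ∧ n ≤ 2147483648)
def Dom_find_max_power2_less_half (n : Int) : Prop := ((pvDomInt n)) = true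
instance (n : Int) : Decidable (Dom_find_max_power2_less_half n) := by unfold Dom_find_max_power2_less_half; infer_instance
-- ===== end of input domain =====

-- B replaces A's iterative doubling loop by the closed-form bit trick (no speed claim).

-- ===== PORT A =====
-- A's while loop: state is the exponent i; power2 = 2^i is recomputed as in the Python.
def pvLoopA (half : Int) (i : Nat) : Nat :=
  if _h1 : (2:Int)^i < half then
    -- i += 1; power2 = 2 ** i
    if _h2 : (2:Int)^(i+1) > half then i  -- i -= 1; break
    else pvLoopA half (i+1)
  else i
termination_by (half - (2:Int)^i).toNat
decreasing_by
  have hp : (0:Int) < (2:Int)^i := by positivity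
  omega

def find_max_power2_less_half (n : Int) : Int :=
  (2:Int) ^ (pvLoopA (PySem.Int.floordiv n 2) 0)

-- ===== PORT B =====
-- 'half.bit_length()' is Nat.size; '1 << k' is 2^k.
def find_max_power2_less_half_alt (n : Int) : Int :=
  let half := PySem.Int.floordiv n 2
  if half < 1 then 1
  else (2:Int) ^ (Nat.size half.toNat - 1)

-- ===== PRECONDITION & SPEC =====
def Spec_find_max_power2_less_half (n : Int) (out : Int) : Prop := out = find_max_power2_less_half_alt n
instance (n : Int) (out : Int) : Decidable (Spec_find_max_power2_less_half n out) := by unfold Spec_find_max_power2_less_half; infer_instance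

-- ===== CLAIM (what is proved, stated in full; the proofs are below) =====
def Claim_equal_find_max_power2_less_half : Prop := ∀ (n : Int), Dom_find_max_power2_less_half n → Spec_find_max_power2_less_half n (find_max_power2_less_half n)

-- ===== LEMMAS AND PROOFS =====

-- A's loop, started with 2^i ≤ half, lands on the exponent j with 2^j ≤ half < 2^(j+1).
theorem pvLoopA_bracket (half : Int) (i : Nat) (h : (2:Int)^i ≤ half) :
    (2:Int)^(pvLoopA half i) ≤ half ∧ half < (2:Int)^(pvLoopA half i + 1) := by
  revert h
  induction i using pvLoopA.induct (half := half) with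
  | case1 i h1 h2 =>
    intro _
    rw [pvLoopA, dif_pos h1, dif_pos h2]
    exact ⟨le_of_lt h1, h2⟩
  | case2 i h1 h2 ih =>
    intro _
    rw [pvLoopA, dif_pos h1, dif_neg h2]
    exact ih (not_lt.mp h2)
  | case3 i h1 =>
    intro h
    rw [pvLoopA, dif_neg h1]
    refine ⟨h, lt_of_le_of_lt (not_lt.mp h1) ?_⟩
    exact pow_lt_pow_right₀ (by norm_num) (by omega)

theorem pow_bracket_unique (half : Int) {a b : Nat}
    (ha : (2:Int)^a ≤ half ∧ half < (2:Int)^(a+1))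
    (hb : (2:Int)^b ≤ half ∧ half < (2:Int)^(b+1)) : a = b := by
  by_contra hne
  rcases Nat.lt_or_ge a b with h | h
  · have : (2:Int)^(a+1) ≤ (2:Int)^b := pow_le_pow_right₀ (by norm_num) h
    omega
  · have h' : b < a := lt_of_le_of_ne h (Ne.symm hne)
    have : (2:Int)^(b+1) ≤ (2:Int)^a := pow_le_pow_right₀ (by norm_num) h'
    omega

-- B's exponent satisfies the same bracket for half ≥ 1.
theorem size_bracket (half : Int) (h : 1 ≤ half) :
    (2:Int)^(Nat.size half.toNat - 1) ≤ half ∧ half < (2:Int)^(Nat.size half.toNat - 1 + 1) := by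
  set m := half.toNat with hm
  have hm1 : 1 ≤ m := by omega
  have hpos : 0 < Nat.size m := Nat.size_pos.mpr (by omega)
  have hlow : 2^(Nat.size m - 1) ≤ m := Nat.lt_size.mp (by omega)
  have hhigh : m < 2^(Nat.size m) := Nat.lt_size_self m
  have heq : Nat.size m - 1 + 1 = Nat.size m := by omega
  constructor
  · calc (2:Int)^(Nat.size m - 1) = ((2^(Nat.size m - 1) : Nat) : Int) := by push_cast; ring
      _ ≤ (m : Int) := by exact_mod_cast hlow
      _ = half := by omega
  · rw [heq]
    calc half = (m : Int) := by omega
      _ < ((2^(Nat.size m) : Nat) : Int) := by exact_mod_cast hhigh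
      _ = (2:Int)^(Nat.size m) := by push_cast; ring

-- ===== VERDICT (by name: the statement is the Claim_ definition above) =====
theorem find_max_power2_less_half_spec : Claim_equal_find_max_power2_less_half := by
  intro n _
  unfold Spec_find_max_power2_less_half find_max_power2_less_half find_max_power2_less_half_alt
  set half := PySem.Int.floordiv n 2 with hh
  by_cases hlt : half < 1
  · -- loop never runs: 2^0 = 1 < half is false
    rw [if_pos hlt, pvLoopA, dif_neg (by simpa using by omega : ¬ (2:Int)^0 < half)]
    norm_num
  · rw [if_neg hlt]
    have h1 : (1:Int) ≤ half := by omega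
    have hA := pvLoopA_bracket half 0 (by simpa using h1)
    have hB := size_bracket half h1
    exact congrArg (fun k => (2:Int)^k) (pow_bracket_unique half hA hB)
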